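-- pv_equiv track=rewrite | github.com/AntonBro338/python-homework | chapter12/ex04.py | is_metathetic
-- ===== SOURCE A (Python) =====
-- def is_metathetic(word1: str, word2: str) -> bool:
--     """
--     Проверяет, образуют ли два слова метатетическую пару.
--
--     Args:
--         word1, word2: два слова одинаковой длины.
--
--     Returns:
--         bool: True, если слова образуют метатетическую пару.
--     """
--     if len(word1) != len(word2):
--         return False
--
--     # Находим позиции, где буквы отличаются
--     diff_positions = []
--     for pos, (c1, c2) in enumerate(zip(word1, word2)):
--         if c1 != c2:
--             diff_positions.append(pos)
--
--     # Условие метатетической пары: ровно два отличия, и буквы поменялись местами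
--     if len(diff_positions) != 2:
--         return False
--
--     pos1, pos2 = diff_positions
--     return word1[pos1] == word2[pos2] and word1[pos2] == word2[pos1]
-- ===== SOURCE B (Python) =====
-- def is_metathetic(word1: str, word2: str) -> bool:
--     if len(word1) != len(word2):
--         return False
--     diffs = sum(c1 != c2 for c1, c2 in zip(word1, word2))
--     return diffs == 2 and sorted(word1) == sorted(word2)
-- ===== Notes on version B (the rewrite author's own statement) =====
-- stated objective: simpler
-- what changed: B replaces A's position-recording loop plus explicit positional swap test by a single diff count and a sorted-permutation comparison (diffs == 2 and sorted(word1) == sorted(word2)).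
import Mathlib
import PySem

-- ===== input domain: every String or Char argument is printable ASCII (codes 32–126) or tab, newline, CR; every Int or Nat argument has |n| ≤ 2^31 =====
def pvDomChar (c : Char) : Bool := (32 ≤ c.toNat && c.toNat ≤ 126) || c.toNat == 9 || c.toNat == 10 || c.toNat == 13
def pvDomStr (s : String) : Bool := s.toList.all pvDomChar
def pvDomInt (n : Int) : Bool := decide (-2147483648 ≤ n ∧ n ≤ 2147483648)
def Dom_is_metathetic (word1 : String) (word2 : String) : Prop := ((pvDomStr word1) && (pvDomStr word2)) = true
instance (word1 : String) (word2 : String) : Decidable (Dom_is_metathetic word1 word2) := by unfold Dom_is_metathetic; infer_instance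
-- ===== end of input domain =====

-- B replaces A's position-recording loop and explicit positional swap test by a diff count
-- plus a sorted-permutation comparison; same result on all inputs, no speed claim.

-- ===== PORT A =====
def is_metathetic (word1 : String) (word2 : String) : Bool :=
  if word1.toList.length ≠ word2.toList.length then false
  else
    let diff_positions :=
      (PySem.List.enumerate (word1.toList.zip word2.toList) 0).foldl
        (fun acc p => if p.2.1 != p.2.2 then acc ++ [p.1] else acc) []
    -- 'if len(diff_positions) != 2: return False' and then 'pos1, pos2 = diff_positions':
    match diff_positions with
    | [pos1, pos2] =>
        -- word1[pos1] etc.; the recorded positions are always in range, so the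
        -- Option-level comparison of PySem.List.pyGet? results is exact
        (PySem.List.pyGet? word1.toList pos1 == PySem.List.pyGet? word2.toList pos2) &&
        (PySem.List.pyGet? word1.toList pos2 == PySem.List.pyGet? word2.toList pos1)
    | _ => false

-- ===== PORT B =====
def is_metathetic_alt (word1 : String) (word2 : String) : Bool :=
  if word1.toList.length ≠ word2.toList.length then false
  else
    let diffs : Int :=
      ((word1.toList.zip word2.toList).map (fun p => if p.1 != p.2 then (1 : Int) else 0)).sum
    diffs == 2 &&
      (PySem.List.sorted word1.toList (fun x => x) false
        == PySem.List.sorted word2.toList (fun x => x) false)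

-- ===== PRECONDITION & SPEC =====
def Spec_is_metathetic (word1 : String) (word2 : String) (out : Bool) : Prop := out = is_metathetic_alt word1 word2
instance (word1 : String) (word2 : String) (out : Bool) : Decidable (Spec_is_metathetic word1 word2 out) := by unfold Spec_is_metathetic; infer_instance

-- ===== CLAIM (what is proved, stated in full; the proofs are below) =====
def Claim_equal_is_metathetic : Prop := ∀ (word1 : String) (word2 : String), Dom_is_metathetic word1 word2 → Spec_is_metathetic word1 word2 (is_metathetic word1 word2)

-- ===== LEMMAS AND PROOFS =====

-- B's diff count is the length of the mismatch list
theorem pv_sum_eq_filter_length (L : List (Char × Char)) :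
    (L.map (fun p => if p.1 != p.2 then (1 : Int) else 0)).sum
      = ((L.filter (fun q => q.1 != q.2)).length : Int) := by
  induction L with
  | nil => simp
  | cons x t ih =>
    simp only [List.map_cons, List.sum_cons, List.filter_cons, ih]
    by_cases h : x.1 = x.2
    · simp [h]
    · have hbx : (x.1 != x.2) = true := by simp [h]
      rw [hbx]
      simp only [if_true, List.length_cons]
      push_cast
      ring

-- the positions list A records has as many entries as the mismatch list
theorem pv_enum_filter_length (L : List (Char × Char)) (s : Int) :
    ((PySem.List.enumerate L s).filter (fun q => q.2.1 != q.2.2)).length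
      = (L.filter (fun q => q.1 != q.2)).length := by
  induction L generalizing s with
  | nil => simp [PySem.List.enumerate_nil]
  | cons x t ih =>
    by_cases h : x.1 != x.2 <;> simp [PySem.List.enumerate_cons, h, ih]

-- a self-zipped segment contributes no recorded positions
theorem pv_enum_self_filter (u : List Char) (s : Int) :
    (PySem.List.enumerate (u.zip u) s).filter (fun q => q.2.1 != q.2.2) = [] := by
  induction u generalizing s with
  | nil => simp [PySem.List.enumerate_nil]
  | cons x t ih => simp [PySem.List.enumerate_cons, ih]

-- zero mismatches means the lists are equal
theorem pv_filter_nil (l1 l2 : List Char) (hlen : l1.length = l2.length)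
    (h : (l1.zip l2).filter (fun q => q.1 != q.2) = []) : l1 = l2 := by
  induction l1 generalizing l2 with
  | nil => cases l2 <;> simp_all
  | cons x t ih =>
    cases l2 with
    | nil => simp_all
    | cons y t2 =>
      simp only [List.length_cons, Nat.add_right_cancel_iff] at hlen
      simp only [List.zip_cons_cons, List.filter_cons] at h
      by_cases hxy : x = y
      · simp only [hxy, bne_self_eq_false, Bool.false_eq_true, if_false] at h
        simp [hxy, ih t2 hlen h]
      · simp [hxy] at h

-- one mismatch: the lists agree except at one position
theorem pv_decomp1 (l1 l2 : List Char) (b b' : Char) (hlen : l1.length = l2.length)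
    (h : (l1.zip l2).filter (fun q => q.1 != q.2) = [(b, b')]) :
    ∃ u v, l1 = u ++ (b :: v) ∧ l2 = u ++ (b' :: v) := by
  induction l1 generalizing l2 with
  | nil => cases l2 <;> simp_all
  | cons x t ih =>
    cases l2 with
    | nil => simp_all
    | cons y t2 =>
      simp only [List.length_cons, Nat.add_right_cancel_iff] at hlen
      simp only [List.zip_cons_cons, List.filter_cons] at h
      by_cases hxy : x = y
      · simp only [hxy, bne_self_eq_false, Bool.false_eq_true, if_false] at h
        obtain ⟨u, v, h1, h2⟩ := ih t2 hlen h
        exact ⟨y :: u, v, by simp [hxy, h1], by simp [h2]⟩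
      · have hbx : (x != y) = true := by simp [hxy]
        rw [hbx] at h
        simp only [if_true, List.cons_eq_cons, Prod.mk.injEq] at h
        obtain ⟨⟨rfl, rfl⟩, ht⟩ := h
        exact ⟨[], t, by simp, by simp [pv_filter_nil t t2 hlen ht]⟩

-- two mismatches: the lists agree except at two positions
theorem pv_decomp2 (l1 l2 : List Char) (a a' b b' : Char) (hlen : l1.length = l2.length)
    (h : (l1.zip l2).filter (fun q => q.1 != q.2) = [(a, a'), (b, b')]) :
    ∃ u v w, l1 = u ++ (a :: (v ++ (b :: w))) ∧ l2 = u ++ (a' :: (v ++ (b' :: w))) := by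
  induction l1 generalizing l2 with
  | nil => cases l2 <;> simp_all
  | cons x t ih =>
    cases l2 with
    | nil => simp_all
    | cons y t2 =>
      simp only [List.length_cons, Nat.add_right_cancel_iff] at hlen
      simp only [List.zip_cons_cons, List.filter_cons] at h
      by_cases hxy : x = y
      · simp only [hxy, bne_self_eq_false, Bool.false_eq_true, if_false] at h
        obtain ⟨u, v, w, h1, h2⟩ := ih t2 hlen h
        exact ⟨y :: u, v, w, by simp [hxy, h1], by simp [h2]⟩
      · have hbx : (x != y) = true := by simp [hxy]
        rw [hbx] at h
        simp only [if_true, List.cons_eq_cons, Prod.mk.injEq] at h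
        obtain ⟨⟨rfl, rfl⟩, ht⟩ := h
        obtain ⟨u, v, h1, h2⟩ := pv_decomp1 t t2 b b' hlen ht
        exact ⟨[], u, v, by simp [h1], by simp [h2]⟩

-- permutation of the two decomposed lists is exactly the swap condition
theorem pv_perm_iff_swap (u v w : List Char) (a a' b b' : Char)
    (ha : a ≠ a') (hb : b ≠ b') :
    (u ++ (a :: (v ++ (b :: w)))).Perm (u ++ (a' :: (v ++ (b' :: w)))) ↔ (a = b' ∧ b = a') := by
  constructor
  · intro hp
    have hca := hp.count_eq a
    have hcb := hp.count_eq b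
    simp only [List.count_append, List.count_cons, beq_iff_eq] at hca hcb
    have e1 : a = b' := by
      by_contra h1
      have hb'a : ¬ b' = a := fun h => h1 h.symm
      have ha'a : ¬ a' = a := fun h => ha h.symm
      by_cases h3 : b = a
      · simp only [if_pos h3, if_neg ha'a, if_neg hb'a, if_true] at hca; omega
      · simp only [if_neg h3, if_neg ha'a, if_neg hb'a, if_true] at hca; omega
    have e2 : b = a' := by
      by_contra h2
      have ha'b : ¬ a' = b := fun h => h2 h.symm
      have hb'b : ¬ b' = b := fun h => hb h.symm
      by_cases h4 : a = b
      · exact hb ((h4.symm).trans e1)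
      · simp only [if_neg h4, if_neg ha'b, if_neg hb'b, if_true] at hcb; omega
    exact ⟨e1, e2⟩
  · rintro ⟨rfl, rfl⟩
    refine List.Perm.append_left u ?_
    have h1 : (a :: (v ++ (b :: w))).Perm (a :: (b :: (v ++ w))) :=
      List.Perm.cons a List.perm_middle
    have h2 : (b :: (v ++ (a :: w))).Perm (b :: (a :: (v ++ w))) :=
      List.Perm.cons b List.perm_middle
    exact h1.trans ((List.Perm.swap b a (v ++ w)).trans h2.symm)

theorem pv_main (w1 w2 : String) : is_metathetic w1 w2 = is_metathetic_alt w1 w2 := by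
  unfold is_metathetic is_metathetic_alt
  by_cases hlen : w1.toList.length = w2.toList.length
  · rw [if_neg (not_not_intro hlen), if_neg (not_not_intro hlen)]
    simp only []
    rw [PySem.List.foldl_append_if (p := fun q : Int × Char × Char => q.2.1 != q.2.2)
          (f := fun q : Int × Char × Char => q.1),
        List.nil_append, pv_sum_eq_filter_length]
    have hsum : ((w1.toList.zip w2.toList).filter (fun q => q.1 != q.2)).length
        = ((PySem.List.enumerate (w1.toList.zip w2.toList) 0).filter
            (fun q => q.2.1 != q.2.2)).length := (pv_enum_filter_length _ _).symm
    rcases hm : (w1.toList.zip w2.toList).filter (fun q => q.1 != q.2) with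
      _ | ⟨⟨a, a'⟩, _ | ⟨⟨b, b'⟩, _ | ⟨⟨c, c'⟩, t⟩⟩⟩
    · rw [hm] at hsum
      have hM : ((PySem.List.enumerate (w1.toList.zip w2.toList) 0).filter
          (fun q => q.2.1 != q.2.2)).map (fun q => q.1) = [] := by
        rw [List.map_eq_nil_iff, ← List.length_eq_zero_iff, ← hsum]
        rfl
      rw [hM, hm]
      simp
    · rw [hm] at hsum
      obtain ⟨x, hM⟩ : ∃ x, ((PySem.List.enumerate (w1.toList.zip w2.toList) 0).filter
          (fun q => q.2.1 != q.2.2)).map (fun q => q.1) = [x] := by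
        apply List.length_eq_one_iff.mp
        rw [List.length_map, ← hsum]
        rfl
      rw [hM, hm]
      simp
    · -- exactly two mismatches
      have hmemA : (a, a') ∈ (w1.toList.zip w2.toList).filter (fun q => q.1 != q.2) := by
        rw [hm]; simp
      have hmemB : (b, b') ∈ (w1.toList.zip w2.toList).filter (fun q => q.1 != q.2) := by
        rw [hm]; simp
      have ha : a ≠ a' := by simpa using List.of_mem_filter hmemA
      have hb : b ≠ b' := by simpa using List.of_mem_filter hmemB
      obtain ⟨u, v, w, h1, h2⟩ := pv_decomp2 w1.toList w2.toList a a' b b' hlen hm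
      have hzip : (w1.toList.zip w2.toList)
          = u.zip u ++ ((a, a') :: (v.zip v ++ ((b, b') :: w.zip w))) := by
        rw [h1, h2, List.zip_append (by rfl)]
        simp [List.zip_append (l₁ := v) (l₂ := v) (by rfl)]
      have henum : ((PySem.List.enumerate (w1.toList.zip w2.toList) 0).filter
            (fun q => q.2.1 != q.2.2)).map (fun q => q.1)
          = [(u.length : Int), (u.length : Int) + 1 + v.length] := by
        rw [hzip, PySem.List.enumerate_append, List.filter_append, pv_enum_self_filter,
          PySem.List.enumerate_cons, List.filter_cons]
        have hba : (a != a') = true := by simp [ha]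
        rw [hba]
        simp only [if_true, List.nil_append]
        rw [PySem.List.enumerate_append, List.filter_append, pv_enum_self_filter,
          PySem.List.enumerate_cons, List.filter_cons]
        have hbb : (b != b') = true := by simp [hb]
        rw [hbb]
        simp only [if_true, pv_enum_self_filter, List.nil_append, List.map_cons, List.map_nil]
        simp [List.length_zip]
      rw [henum, hm, h1, h2]
      have hg1 : PySem.List.pyGet? (u ++ (a :: (v ++ (b :: w)))) (u.length : Int) = some a :=
        PySem.List.pyGet?_append_length u (v ++ (b :: w)) a
      have hg2 : PySem.List.pyGet? (u ++ (a' :: (v ++ (b' :: w)))) (u.length : Int) = some a' :=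
        PySem.List.pyGet?_append_length u (v ++ (b' :: w)) a'
      have e1 : u ++ (a :: (v ++ (b :: w))) = (u ++ (a :: v)) ++ (b :: w) := by simp
      have e2 : u ++ (a' :: (v ++ (b' :: w))) = (u ++ (a' :: v)) ++ (b' :: w) := by simp
      have eidx : ((u.length : Int) + 1 + v.length) = ((u ++ (a :: v)).length : Int) := by
        simp; ring
      have eidx' : ((u.length : Int) + 1 + v.length) = ((u ++ (a' :: v)).length : Int) := by
        simp; ring
      have hg3 : PySem.List.pyGet? (u ++ (a :: (v ++ (b :: w)))) ((u.length : Int) + 1 + v.length)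
          = some b := by
        rw [e1, eidx]; exact PySem.List.pyGet?_append_length (u ++ (a :: v)) w b
      have hg4 : PySem.List.pyGet? (u ++ (a' :: (v ++ (b' :: w)))) ((u.length : Int) + 1 + v.length)
          = some b' := by
        rw [e2, eidx']; exact PySem.List.pyGet?_append_length (u ++ (a' :: v)) w b'
      have hsort : ((PySem.List.sorted (u ++ (a :: (v ++ (b :: w)))) (fun x => x) false)
            == (PySem.List.sorted (u ++ (a' :: (v ++ (b' :: w)))) (fun x => x) false))
          = decide (a = b' ∧ b = a') := by
        by_cases hp : a = b' ∧ b = a'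
        · have hperm := (pv_perm_iff_swap u v w a a' b b' ha hb).mpr hp
          rw [(PySem.List.sorted_id_eq_sorted_id_iff_perm _ _).mpr hperm]
          simp [hp]
        · have hne : (PySem.List.sorted (u ++ (a :: (v ++ (b :: w)))) (fun x => x) false)
              ≠ (PySem.List.sorted (u ++ (a' :: (v ++ (b' :: w)))) (fun x => x) false) := by
            intro hcontra
            exact hp ((pv_perm_iff_swap u v w a a' b b' ha hb).mp
              ((PySem.List.sorted_id_eq_sorted_id_iff_perm _ _).mp hcontra))
          simp [hne, hp]
      simp only [hg1, hg2, hg3, hg4, hsort]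
      by_cases q1 : a = b' <;> by_cases q2 : b = a' <;> simp [q1, q2]
    · rw [hm] at hsum
      rcases hM : ((PySem.List.enumerate (w1.toList.zip w2.toList) 0).filter
          (fun q => q.2.1 != q.2.2)).map (fun q => q.1) with _ | ⟨x, _ | ⟨y, _ | ⟨z, t2⟩⟩⟩ <;>
        have hl := congrArg List.length hM <;>
        rw [List.length_map, ← hsum] at hl <;> simp at hl
      rw [hM, hm]
      have h32 : ¬ ((((a, a') :: (b, b') :: (c, c') :: t).length : Nat) : Int) = 2 := by
        simp; omega
      simp only [List.length_cons] at h32 ⊢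
      rw [beq_eq_false_iff_ne.mpr h32]
      simp
  · rw [if_pos hlen, if_pos hlen]

-- ===== VERDICT (by name: the statement is the Claim_ definition above) =====
theorem is_metathetic_spec : Claim_equal_is_metathetic := by
  intro w1 w2 _
  unfold Spec_is_metathetic
  exact pv_main w1 w2
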